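-- pv_equiv track=rewrite | github.com/saaly182/AdventOfCode | 2018/d02/d02.py | part2
-- ===== SOURCE A (Python) =====
-- import itertools
--
-- def part2(words: list[str]) -> str | None:
--     for w1, w2 in itertools.combinations(words, 2):
--         diffcount = 0
--         diffpos = None
--         for pos, (c1, c2) in enumerate(zip(w1, w2, strict=True)):
--             if c1 != c2:
--                 diffcount += 1
--                 diffpos = pos
--             if diffcount > 1:
--                 break
--         if diffcount == 1:
--             return w1[:diffpos] + w1[diffpos + 1:]
--     return None
-- ===== SOURCE B (Python) =====
-- def part2(words: list[str]) -> str | None: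
--     # One pass per character position: bucket words by the string with that
--     # position removed; a bucket collision between two distinct words is a
--     # pair differing in exactly one position.  Keep the (i, j)-lexicographically
--     # smallest colliding pair, matching the pair order of the naive scan.
--     best = None  # (i, j, common_letters)
--     maxlen = 0
--     for w in words:
--         maxlen = max(maxlen, len(w))
--     for p in range(maxlen):
--         first = {}  # hole -> first index having it (holes of equal length imply equal word length)
--         for j, w in enumerate(words):
--             if p >= len(w):
--                 continue
--             key = w[:p] + w[p + 1:]
--             i = first.get(key)
--             if i is None:
--                 first[key] = j
--             elif words[i] != w:
--                 if best is None or (i, j) < (best[0], best[1]):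
--                     best = (i, j, key)
--     return best[2] if best is not None else None
-- ===== Notes on version B (the rewrite author's own statement) =====
-- stated objective: faster
-- what changed: A compares every pair of words with an early-exit character scan (O(n^2) pairs); B makes one pass per character position, bucketing words by the string with that position removed in a dict so colliding buckets directly yield single-difference pairs, and keeps the (i,j)-lexicographically smallest colliding pair to reproduce A's pair order.
import Mathlib
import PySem

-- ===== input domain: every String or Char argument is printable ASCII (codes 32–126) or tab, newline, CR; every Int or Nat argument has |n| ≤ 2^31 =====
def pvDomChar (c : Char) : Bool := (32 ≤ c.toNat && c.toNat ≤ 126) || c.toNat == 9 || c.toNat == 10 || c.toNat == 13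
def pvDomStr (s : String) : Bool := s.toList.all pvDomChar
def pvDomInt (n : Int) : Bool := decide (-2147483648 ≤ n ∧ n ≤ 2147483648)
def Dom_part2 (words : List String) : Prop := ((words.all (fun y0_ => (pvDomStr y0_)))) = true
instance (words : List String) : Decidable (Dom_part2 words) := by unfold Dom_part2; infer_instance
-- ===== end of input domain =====

-- B replaces A's all-pairs scan by one bucket pass per character position (keyed
-- on the word with that position removed), keeping the (i,j)-lexicographically
-- smallest colliding pair; objective: faster on many-words inputs.

-- ===== PORT A =====
-- inner `for pos, (c1, c2) in enumerate(zip(w1, w2, strict=True))` loop: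
-- counts differing positions, remembers the last, stops once the count exceeds 1
def pvDiffScan : List Char → List Char → Nat → Option Nat → Nat → Nat × Option Nat
  | c1 :: t1, c2 :: t2, count, dpos, idx =>
    let count' := if c1 ≠ c2 then count + 1 else count
    let dpos'  := if c1 ≠ c2 then some idx else dpos
    if 1 < count' then (count', dpos')
    else pvDiffScan t1 t2 count' dpos' (idx + 1)
  | _, _, count, dpos, _ => (count, dpos)

-- one (w1, w2) pair of the combinations loop; `zip(..., strict=True)` raises
-- ValueError when the lengths differ and fewer than two differences occur in the
-- common prefix — those inputs are excluded by Pre_part2, here we yield none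
def pvCheckPair (w1 w2 : String) : Option String :=
  let r := pvDiffScan w1.toList w2.toList 0 none 0
  if r.1 = 1 ∧ w1.toList.length = w2.toList.length then
    match r.2 with
    | some p => some (String.ofList (PySem.Chars.slice w1.toList none (some (p : Int)) ++
                                 PySem.Chars.slice w1.toList (some ((p : Int) + 1)) none))
    | none => none
  else none

-- `for w1, w2 in itertools.combinations(words, 2)` as the standard pair of
-- structural recursions: w1 with each later word, then the tail
def pvFindPartner (w : String) : List String → Option String
  | [] => none
  | v :: vs =>
    match pvCheckPair w v with
    | some r => some r
    | none => pvFindPartner w vs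

def pvGoA : List String → Option String
  | [] => none
  | w :: ws =>
    match pvFindPartner w ws with
    | some r => some r
    | none => pvGoA ws

def part2 (words : List String) : Option String := pvGoA words

-- ===== PORT B =====
-- body of `for j, w in enumerate(words)` at position p; st = (first, best)
def pvStepB (words : List String) (p : Nat)
    (st : PySem.Dict (List Char) Nat × Option (Nat × Nat × List Char))
    (jw : String × Nat) : PySem.Dict (List Char) Nat × Option (Nat × Nat × List Char) :=
  if jw.1.toList.length ≤ p then st
  else
    let key := PySem.Chars.slice jw.1.toList none (some (p : Int)) ++
               PySem.Chars.slice jw.1.toList (some ((p : Int) + 1)) none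
    match st.1.get? key with
    | none => (st.1.insert key jw.2, st.2)
    | some i =>
      if words.getD i "" ≠ jw.1 then
        match st.2 with
        | none => (st.1, some (i, jw.2, key))
        | some b =>
          if i < b.1 ∨ (i = b.1 ∧ jw.2 < b.2.1) then (st.1, some (i, jw.2, key)) else st
      else st

def part2_alt (words : List String) : Option String :=
  let maxlen := words.foldl (fun m w => max m w.toList.length) 0
  let best := (List.range maxlen).foldl
    (fun b p => ((words.zipIdx).foldl (pvStepB words p) (PySem.Dict.empty, b)).2) none
  match best with
  | some b => some (String.ofList b.2.2)
  | none => none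

-- ===== PRECONDITION & SPEC =====
def pvWordAt (words : List String) (i : Nat) : List Char := (words.getD i "").toList
def pvCnt (u v : List Char) : Nat := ((u.zip v).filter (fun c => c.1 ≠ c.2)).length
def pvCand (words : List String) (i j : Nat) : Bool :=
  (pvWordAt words i).length == (pvWordAt words j).length &&
  pvCnt (pvWordAt words i) (pvWordAt words j) == 1

-- Pre_part2 excludes exactly the inputs on which A raises ValueError (from
-- zip(..., strict=True)): those where some unequal-length pair with at most one
-- difference in the common prefix occurs, in combinations order, before any
-- single-difference equal-length pair.
def Pre_part2 (words : List String) : Prop :=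
  ∀ i, i < words.length → ∀ j, j < words.length →
    (i < j ∧ (pvWordAt words i).length ≠ (pvWordAt words j).length ∧
      pvCnt (pvWordAt words i) (pvWordAt words j) < 2) →
    ∃ i', i' < words.length ∧ ∃ j', j' < words.length ∧ i' < j' ∧
      pvCand words i' j' = true ∧ (i' < i ∨ (i' = i ∧ j' < j))
instance (words : List String) : Decidable (Pre_part2 words) := by
  unfold Pre_part2
  exact @Nat.decidableBallLT words.length _
    (fun i hi => @Nat.decidableBallLT words.length _ (fun j hj => inferInstance))

def pvWitness_part2 : List String := ["abcde", "fghij", "klmno", "fguij"]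

def Spec_part2 (words : List String) (out : Option String) : Prop := out = part2_alt words
instance (words : List String) (out : Option String) : Decidable (Spec_part2 words out) := by
  unfold Spec_part2; infer_instance

-- ===== CLAIM (what is proved, stated in full; the proofs are below) =====
def Claim_equal_part2 : Prop := ∀ (words : List String), Dom_part2 words → Pre_part2 words → Spec_part2 words (part2 words)

-- ===== LEMMAS AND PROOFS =====

-- list-level notions shared by the two characterizations
def pvDpos (u v : List Char) : Nat := (u.zip v).findIdx (fun c => c.1 ≠ c.2)
def pvHole (u : List Char) (p : Nat) : List Char := u.take p ++ u.drop (p + 1)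
def pvKey (words : List String) (i j : Nat) : List Char :=
  pvHole (pvWordAt words i) (pvDpos (pvWordAt words i) (pvWordAt words j))
def pvHoleAt (words : List String) (p i : Nat) : Option (List Char) :=
  if p < (pvWordAt words i).length then some (pvHole (pvWordAt words i) p) else none
def pvRes (words : List String) (i j : Nat) : Option (List Char) :=
  if pvCand words i j then some (pvKey words i j) else none
def pvPairs (n k : Nat) : List (Nat × Nat) :=
  (List.range' k (n - k)).flatMap (fun i => (List.range' (i + 1) (n - (i + 1))).map (fun j => (i, j)))
def pvLexLe (a b : Nat × Nat) : Prop := a.1 < b.1 ∨ (a.1 = b.1 ∧ a.2 ≤ b.2)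
def pvLexLt (a b : Nat × Nat) : Prop := a.1 < b.1 ∨ (a.1 = b.1 ∧ a.2 < b.2)
def pvTr (x : Nat × Nat × List Char) : Nat × Nat := (x.1, x.2.1)
def pvOptCand (words : List String) (b : Option (Nat × Nat × List Char)) : Prop :=
  ∀ x, b = some x → x.1 < x.2.1 ∧ x.2.1 < words.length ∧ pvCand words x.1 x.2.1 = true ∧
    x.2.2 = pvKey words x.1 x.2.1
def pvBetter (r b : Option (Nat × Nat × List Char)) : Prop :=
  ∀ x, b = some x → ∃ y, r = some y ∧ pvLexLe (pvTr y) (pvTr x)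
def pvBoundBy (r : Option (Nat × Nat × List Char)) (q : Nat × Nat) : Prop :=
  ∃ y, r = some y ∧ pvLexLe (pvTr y) q
def pvDictInv (words : List String) (p t : Nat) (d : PySem.Dict (List Char) Nat) : Prop :=
  ∀ k i, d.get? k = some i ↔
    (i < t ∧ pvHoleAt words p i = some k ∧ ∀ a, a < i → pvHoleAt words p a ≠ some k)
def pvHitCond (words : List String) (p i j : Nat) : Prop :=
  ∃ k, pvHoleAt words p j = some k ∧ pvHoleAt words p i = some k ∧ i < j ∧
    (∀ a, a < i → pvHoleAt words p a ≠ some k) ∧ pvWordAt words i ≠ pvWordAt words j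

-- ---- basic list lemmas ----
lemma pvSlicePair (u : List Char) (p : Nat) :
    PySem.Chars.slice u none (some (p : Int)) ++ PySem.Chars.slice u (some ((p : Int) + 1)) none
      = pvHole u p := by
  have h1 : ((p : Int) + 1) = (((p + 1 : Nat) : Int)) := by push_cast; ring
  rw [PySem.Chars.slice_eq_listSlice, PySem.Chars.slice_eq_listSlice, h1,
    PySem.List.slice_to_natCast, PySem.List.slice_from_natCast, pvHole]

lemma pvCnt_cons (a b : Char) (u v : List Char) :
    pvCnt (a :: u) (b :: v) = (if a ≠ b then 1 else 0) + pvCnt u v := by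
  by_cases h : a = b <;> simp [pvCnt, h] <;> omega

lemma pvCnt_self (u : List Char) : pvCnt u u = 0 := by
  induction u with
  | nil => rfl
  | cons a u ih => rw [pvCnt_cons]; simp [ih]

lemma pvCnt_zero_eq (u v : List Char) (hl : u.length = v.length) (h : pvCnt u v = 0) : u = v := by
  induction u generalizing v with
  | nil => cases v with
    | nil => rfl
    | cons b v => simp at hl
  | cons a u ih =>
    cases v with
    | nil => simp at hl
    | cons b v =>
      rw [pvCnt_cons] at h
      by_cases hab : a = b
      · simp [hab] at h ⊢
        exact ih v (by simpa using hl) h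
      · simp [hab] at h

-- structure of a single-difference pair
lemma pvCandStruct (u v : List Char) (hl : u.length = v.length) (h1 : pvCnt u v = 1) :
    pvDpos u v < u.length ∧ u ≠ v ∧ pvHole u (pvDpos u v) = pvHole v (pvDpos u v) := by
  induction u generalizing v with
  | nil =>
    cases v with
    | nil => simp [pvCnt] at h1
    | cons b v => simp at hl
  | cons a u ih =>
    cases v with
    | nil => simp at hl
    | cons b v =>
      rw [pvCnt_cons] at h1
      by_cases hab : a = b
      · simp [hab] at h1
        obtain ⟨hd, hne, hh⟩ := ih v (by simpa using hl) h1
        have hdp : pvDpos (a :: u) (b :: v) = pvDpos u v + 1 := by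
          simp [pvDpos, List.findIdx_cons, hab]
        refine ⟨?_, ?_, ?_⟩
        · rw [hdp]; simp only [List.length_cons]; omega
        · intro hcontra
          exact hne (by injection hcontra)
        · rw [hdp]; subst hab
          simpa [pvHole, List.take_succ_cons, List.drop_succ_cons] using hh
      · simp [hab] at h1
        have huv : u = v := pvCnt_zero_eq u v (by simpa using hl) h1
        have hdp : pvDpos (a :: u) (b :: v) = 0 := by
          simp [pvDpos, List.findIdx_cons, hab]
        refine ⟨?_, ?_, ?_⟩
        · rw [hdp]; simp
        · intro hcontra
          exact hab (by injection hcontra)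
        · rw [hdp]
          simp [pvHole, huv]

-- two words with the same hole at p that differ are a single-difference pair at p
lemma pvHoleLemma (u v : List Char) (p : Nat) (hup : p < u.length) (hvp : p < v.length)
    (hh : pvHole u p = pvHole v p) (hne : u ≠ v) :
    u.length = v.length ∧ pvCnt u v = 1 ∧ pvDpos u v = p := by
  induction p generalizing u v with
  | zero =>
    cases u with
    | nil => simp at hup
    | cons a u' =>
      cases v with
      | nil => simp at hvp
      | cons b v' =>
        have h1 : u' = v' := by simpa [pvHole] using hh
        have hab : a ≠ b := by
          intro hab
          exact hne (by rw [hab, h1])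
        subst h1
        refine ⟨by simp, ?_, ?_⟩
        · rw [pvCnt_cons]; simp [hab, pvCnt_self]
        · simp [pvDpos, List.findIdx_cons, hab]
  | succ p ih =>
    cases u with
    | nil => simp at hup
    | cons a u' =>
      cases v with
      | nil => simp at hvp
      | cons b v' =>
        have hh' : a = b ∧ pvHole u' p = pvHole v' p := by
          have := hh
          simp [pvHole, List.take_succ_cons, List.drop_succ_cons] at this
          exact this
        obtain ⟨hab, hh2⟩ := hh'
        subst hab
        have hne' : u' ≠ v' := by
          intro hc; exact hne (by rw [hc])
        obtain ⟨hL, hC, hD⟩ := ih u' v' (by simpa using hup) (by simpa using hvp) hh2 hne'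
        refine ⟨by simpa using hL, ?_, ?_⟩
        · rw [pvCnt_cons]; simpa using hC
        · have hstep : pvDpos (a :: u') (a :: v') = pvDpos u' v' + 1 := by
            simp [pvDpos, List.findIdx_cons]
          rw [hstep, hD]

lemma pvPairs_cons (n k : Nat) (h : k < n) :
    pvPairs n k = ((List.range' (k + 1) (n - (k + 1))).map (fun j => (k, j))) ++ pvPairs n (k + 1) := by
  unfold pvPairs
  rw [show n - k = (n - (k + 1)) + 1 by omega, List.range'_succ, List.flatMap_cons]

-- ---- A-side characterization ----
lemma pvScanFrom1_zero (u v : List Char) (q idx : Nat) (h : pvCnt u v = 0) :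
    pvDiffScan u v 1 (some q) idx = (1, some q) := by
  induction u generalizing v idx with
  | nil => cases v <;> rfl
  | cons c1 t1 ih =>
    cases v with
    | nil => rfl
    | cons c2 t2 =>
      rw [pvCnt_cons] at h
      by_cases hc : c1 = c2
      · simp [hc] at h
        simpa [pvDiffScan, hc] using ih t2 (idx + 1) h
      · simp [hc] at h

lemma pvScanFrom1_pos (u v : List Char) (q idx : Nat) (h : pvCnt u v ≠ 0) :
    (pvDiffScan u v 1 (some q) idx).1 = 2 := by
  induction u generalizing v idx with
  | nil => cases v <;> simp [pvCnt] at h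
  | cons c1 t1 ih =>
    cases v with
    | nil => simp [pvCnt] at h
    | cons c2 t2 =>
      rw [pvCnt_cons] at h
      by_cases hc : c1 = c2
      · simp [hc] at h
        simpa [pvDiffScan, hc] using ih t2 (idx + 1) h
      · simp [pvDiffScan, hc]

lemma pvScan_zero (u v : List Char) (idx : Nat) (h : pvCnt u v = 0) :
    pvDiffScan u v 0 none idx = (0, none) := by
  induction u generalizing v idx with
  | nil => cases v <;> rfl
  | cons c1 t1 ih =>
    cases v with
    | nil => rfl
    | cons c2 t2 =>
      rw [pvCnt_cons] at h
      by_cases hc : c1 = c2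
      · simp [hc] at h
        simpa [pvDiffScan, hc] using ih t2 (idx + 1) h
      · simp [hc] at h

lemma pvScan_one (u v : List Char) (idx : Nat) (h : pvCnt u v = 1) :
    pvDiffScan u v 0 none idx = (1, some (idx + pvDpos u v)) := by
  induction u generalizing v idx with
  | nil => cases v <;> simp [pvCnt] at h
  | cons c1 t1 ih =>
    cases v with
    | nil => simp [pvCnt] at h
    | cons c2 t2 =>
      rw [pvCnt_cons] at h
      by_cases hc : c1 = c2
      · simp [hc] at h
        have := ih t2 (idx + 1) h
        rw [show pvDpos (c1 :: t1) (c2 :: t2) = pvDpos t1 t2 + 1 by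
          simp [pvDpos, List.findIdx_cons, hc]]
        simpa [pvDiffScan, hc, Nat.add_assoc, Nat.add_comm 1 (pvDpos t1 t2)] using this
      · simp [hc] at h
        rw [show pvDpos (c1 :: t1) (c2 :: t2) = 0 by simp [pvDpos, List.findIdx_cons, hc]]
        simpa [pvDiffScan, hc] using pvScanFrom1_zero t1 t2 idx (idx + 1) h

lemma pvScan_two (u v : List Char) (idx : Nat) (h : 2 ≤ pvCnt u v) :
    (pvDiffScan u v 0 none idx).1 = 2 := by
  induction u generalizing v idx with
  | nil => cases v <;> simp [pvCnt] at h
  | cons c1 t1 ih =>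
    cases v with
    | nil => simp [pvCnt] at h
    | cons c2 t2 =>
      rw [pvCnt_cons] at h
      by_cases hc : c1 = c2
      · simp [hc] at h
        simpa [pvDiffScan, hc] using ih t2 (idx + 1) h
      · simp [hc] at h
        simpa [pvDiffScan, hc] using pvScanFrom1_pos t1 t2 idx (idx + 1) (by omega)

lemma pvCheckPair_eq (words : List String) (i j : Nat) :
    pvCheckPair (words.getD i "") (words.getD j "") = (pvRes words i j).map String.ofList := by
  have hwi : (words.getD i "").toList = pvWordAt words i := rfl
  have hwj : (words.getD j "").toList = pvWordAt words j := rfl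
  unfold pvCheckPair pvRes
  rw [hwi, hwj]
  by_cases hl : (pvWordAt words i).length = (pvWordAt words j).length
  · rcases hcnt : pvCnt (pvWordAt words i) (pvWordAt words j) with _ | n
    · rw [pvScan_zero _ _ 0 hcnt]
      simp [pvCand, hl, hcnt]
    · rcases n with _ | n
      · have h1 : pvDiffScan (pvWordAt words i) (pvWordAt words j) 0 none 0
            = (1, some (pvDpos (pvWordAt words i) (pvWordAt words j))) := by
          rw [pvScan_one _ _ 0 hcnt]; simp
        rw [h1]
        have hc : pvCand words i j = true := by simp [pvCand, hl, hcnt]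
        rw [if_pos ⟨rfl, hl⟩, if_pos hc, Option.map_some]
        exact congrArg (fun l => some (String.ofList l))
          (pvSlicePair (pvWordAt words i) (pvDpos (pvWordAt words i) (pvWordAt words j)))
      · have h2 := pvScan_two (pvWordAt words i) (pvWordAt words j) 0 (by omega)
        simp [pvCand, hl, hcnt, h2]
  · simp [pvCand, hl]

lemma pvDropMap (words : List String) (k : Nat) :
    words.drop k = (List.range' k (words.length - k)).map (fun i => words.getD i "") := by
  apply List.ext_getElem
  · simp
  · intro m h1 h2
    have hm : k + m < words.length := by
      simp at h1; omega
    rw [List.getElem_drop, List.getElem_map, List.getElem_range',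
      List.getD_eq_getElem words "" (by omega : k + 1 * m < words.length)]
    congr 1
    omega

lemma pvFindPartner_eq (w : String) (vs : List String) :
    pvFindPartner w vs = vs.findSome? (pvCheckPair w) := by
  induction vs with
  | nil => rfl
  | cons v vs ih =>
    rw [List.findSome?_cons, pvFindPartner]
    cases pvCheckPair w v <;> simp [ih]

lemma pvGoA_eq (words : List String) :
    ∀ (m k : Nat), words.length - k = m →
    pvGoA (words.drop k) =
      (pvPairs words.length k).findSome?
        (fun q => pvCheckPair (words.getD q.1 "") (words.getD q.2 "")) := by
  intro m
  induction m with
  | zero =>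
    intro k hk
    rw [List.drop_eq_nil_of_le (by omega)]
    have hp : pvPairs words.length k = [] := by
      unfold pvPairs; rw [hk]; rfl
    rw [hp]; rfl
  | succ m ih =>
    intro k hk
    have hkn : k < words.length := by omega
    have hgetk : words.getD k "" = words[k] := List.getD_eq_getElem words "" hkn
    rw [List.drop_eq_getElem_cons hkn, pvGoA]
    have hfp : pvFindPartner words[k] (words.drop (k + 1))
        = List.findSome? (fun q => pvCheckPair (words.getD q.1 "") (words.getD q.2 ""))
            ((List.range' (k + 1) (words.length - (k + 1))).map (fun j => (k, j))) := by
      rw [pvFindPartner_eq, pvDropMap words (k + 1), List.findSome?_map, List.findSome?_map]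
      congr 1
      funext j
      simp only [Function.comp_apply]
      rw [hgetk]
    rw [hfp, pvPairs_cons _ _ hkn, List.findSome?_append, ih (k + 1) (by omega)]
    cases List.findSome? (fun q => pvCheckPair (words.getD q.1 "") (words.getD q.2 ""))
        ((List.range' (k + 1) (words.length - (k + 1))).map (fun j => (k, j))) with
    | none => simp
    | some r => simp

lemma pvFindSomeIf {α β : Type} (l : List α) (c : α → Bool) (g : α → β) :
    (l.findSome? (fun x => if c x then some (g x) else none)) = ((l.filter c).head?).map g := by
  induction l with
  | nil => rfl
  | cons a l ih =>
    rw [List.findSome?_cons, List.filter_cons]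
    by_cases h : c a = true
    · simp [h]
    · have hf : c a = false := by simpa using h
      simp [hf, ih]

lemma pvMapFindSome {α β γ : Type} (l : List α) (f : α → Option β) (g : β → γ) :
    (l.findSome? (fun x => (f x).map g)) = (l.findSome? f).map g := by
  induction l with
  | nil => rfl
  | cons a l ih =>
    rw [List.findSome?_cons, List.findSome?_cons]
    cases f a <;> simp [ih]

lemma pvPart2_eq (words : List String) :
    part2 words =
      ((((pvPairs words.length 0).filter (fun q => pvCand words q.1 q.2)).head?).map
        (fun q => pvKey words q.1 q.2)).map String.ofList := by
  have h0 := pvGoA_eq words words.length 0 (by omega)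
  rw [List.drop_zero] at h0
  show pvGoA words = _
  rw [h0]
  have hfun : (fun (q : Nat × Nat) => pvCheckPair (words.getD q.1 "") (words.getD q.2 ""))
      = fun (q : Nat × Nat) => (pvRes words q.1 q.2).map String.ofList := by
    funext q; exact pvCheckPair_eq words q.1 q.2
  rw [hfun, pvMapFindSome]
  have hres : (fun (q : Nat × Nat) => pvRes words q.1 q.2)
      = fun (q : Nat × Nat) => if pvCand words q.1 q.2 then some (pvKey words q.1 q.2) else none := rfl
  rw [hres, pvFindSomeIf]

-- ---- pvPairs facts ----
lemma pvPairs_mem (n k : Nat) (q : Nat × Nat) :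
    q ∈ pvPairs n k ↔ k ≤ q.1 ∧ q.1 < q.2 ∧ q.2 < n := by
  obtain ⟨x, y⟩ := q
  simp only [pvPairs, List.mem_flatMap, List.mem_map, List.mem_range'_1]
  constructor
  · rintro ⟨i, ⟨hi1, hi2⟩, j, ⟨hj1, hj2⟩, heq⟩
    injection heq with h1 h2
    subst h1; subst h2
    refine ⟨hi1, by omega, by omega⟩
  · rintro ⟨h1, h2, h3⟩
    exact ⟨x, ⟨h1, by omega⟩, y, ⟨by omega, by omega⟩, rfl⟩

lemma pvPairs_pairwise (n k : Nat) : (pvPairs n k).Pairwise pvLexLt := by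
  suffices h : ∀ m k', n - k' = m → (pvPairs n k').Pairwise pvLexLt from h (n - k) k rfl
  intro m
  induction m with
  | zero =>
    intro k' hk
    have hp : pvPairs n k' = [] := by unfold pvPairs; rw [hk]; rfl
    rw [hp]; exact List.Pairwise.nil
  | succ m ih =>
    intro k' hk
    have hkn : k' < n := by omega
    rw [pvPairs_cons _ _ hkn, List.pairwise_append]
    refine ⟨?_, ih (k' + 1) (by omega), ?_⟩
    · refine List.Pairwise.map _ (fun a b hab => ?_) (List.pairwise_lt_range' 1)
      exact Or.inr ⟨rfl, hab⟩
    · intro a ha b hb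
      obtain ⟨j, hj, rfl⟩ := List.mem_map.mp ha
      have hb' := (pvPairs_mem n (k' + 1) b).mp hb
      exact Or.inl (by omega)

-- ---- order helpers ----
lemma pvLexLe_refl (a : Nat × Nat) : pvLexLe a a := by
  unfold pvLexLe; omega

lemma pvLexLe_trans {a b c : Nat × Nat} (h1 : pvLexLe a b) (h2 : pvLexLe b c) : pvLexLe a c := by
  unfold pvLexLe at *; omega

lemma pvBetter_refl (b : Option (Nat × Nat × List Char)) : pvBetter b b := by
  intro x hx
  exact ⟨x, hx, pvLexLe_refl _⟩

lemma pvBetter_none (r : Option (Nat × Nat × List Char)) : pvBetter r none := by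
  intro x hx
  exact absurd hx (by simp)

lemma pvBetter_trans {a b c : Option (Nat × Nat × List Char)}
    (h1 : pvBetter a b) (h2 : pvBetter b c) : pvBetter a c := by
  intro x hx
  obtain ⟨y, hy, hle⟩ := h2 x hx
  obtain ⟨z, hz, hle'⟩ := h1 y hy
  exact ⟨z, hz, pvLexLe_trans hle' hle⟩

lemma pvBetter_bound {r b : Option (Nat × Nat × List Char)} {q : Nat × Nat}
    (h : pvBetter r b) (hb : pvBoundBy b q) : pvBoundBy r q := by
  obtain ⟨y, hy, hle⟩ := hb
  obtain ⟨z, hz, hle'⟩ := h y hy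
  exact ⟨z, hz, pvLexLe_trans hle' hle⟩

-- least index with a given hole
lemma pvFirstEx (words : List String) (p t : Nat) (k : List Char)
    (h : ∃ a, a < t ∧ pvHoleAt words p a = some k) :
    ∃ a, a < t ∧ pvHoleAt words p a = some k ∧ ∀ b, b < a → pvHoleAt words p b ≠ some k := by
  classical
  have h' : ∃ a, a < t ∧ pvHoleAt words p a = some k := h
  refine ⟨Nat.find h', (Nat.find_spec h').1, (Nat.find_spec h').2, ?_⟩
  intro b hb hbk
  exact Nat.find_min h' hb ⟨lt_trans hb (Nat.find_spec h').1, hbk⟩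

lemma pvHoleAt_some {words : List String} {p a : Nat} {k : List Char}
    (h : pvHoleAt words p a = some k) :
    p < (pvWordAt words a).length ∧ pvHole (pvWordAt words a) p = k := by
  unfold pvHoleAt at h
  by_cases hpa : p < (pvWordAt words a).length
  · rw [if_pos hpa] at h; injection h with h; exact ⟨hpa, h⟩
  · rw [if_neg hpa] at h; exact absurd h (by simp)

-- ---- inner fold (one position) ----
lemma pvInner (words : List String) (p : Nat) :
    ∀ (m t : Nat), words.length - t = m → t ≤ words.length →
    ∀ (d : PySem.Dict (List Char) Nat) (b : Option (Nat × Nat × List Char)),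
    pvDictInv words p t d → pvOptCand words b →
    (pvOptCand words (((words.drop t).zipIdx t).foldl (pvStepB words p) (d, b)).2 ∧
     pvBetter (((words.drop t).zipIdx t).foldl (pvStepB words p) (d, b)).2 b ∧
     (∀ i j, t ≤ j → pvHitCond words p i j →
        pvBoundBy (((words.drop t).zipIdx t).foldl (pvStepB words p) (d, b)).2 (i, j))) := by
  intro m
  induction m with
  | zero =>
    intro t hm ht d b hd hb
    rw [List.drop_eq_nil_of_le (by omega)]
    simp only [List.zipIdx_nil, List.foldl_nil]
    refine ⟨hb, pvBetter_refl b, ?_⟩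
    intro i j hj hhit
    obtain ⟨k, hkj, _⟩ := hhit
    exfalso
    have hjlen : (pvWordAt words j).length = 0 := by
      unfold pvWordAt
      rw [List.getD_eq_default _ _ (by omega)]
      rfl
    have := (pvHoleAt_some hkj).1
    omega
  | succ m ih =>
    intro t hm ht d b hd hb
    have htn : t < words.length := by omega
    have hget : words.getD t "" = words[t] := List.getD_eq_getElem words "" htn
    have hwt : pvWordAt words t = words[t].toList := by unfold pvWordAt; rw [hget]
    rw [List.drop_eq_getElem_cons htn, List.zipIdx_cons, List.foldl_cons]
    by_cases hlen : words[t].toList.length ≤ p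
    · -- position past this word: skip
      have hstep : pvStepB words p (d, b) (words[t], t) = (d, b) := by
        simp only [pvStepB]
        rw [if_pos hlen]
      rw [hstep]
      have hholet : pvHoleAt words p t = none := by
        unfold pvHoleAt
        rw [if_neg (by rw [hwt]; omega)]
      have hd' : pvDictInv words p (t + 1) d := by
        intro k i
        constructor
        · intro hsome
          have h2 := (hd k i).mp hsome
          exact ⟨by omega, h2.2.1, h2.2.2⟩
        · rintro ⟨h1, h2, h3⟩
          apply (hd k i).mpr
          rcases (by omega : i < t ∨ i = t) with h | rfl
          · exact ⟨h, h2, h3⟩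
          · rw [hholet] at h2; exact absurd h2 (by simp)
      obtain ⟨A1, A2, A3⟩ := ih (t + 1) (by omega) (by omega) d b hd' hb
      refine ⟨A1, A2, ?_⟩
      intro i j hj hhit
      rcases (by omega : j = t ∨ t + 1 ≤ j) with rfl | hj'
      · obtain ⟨k, hkj, _⟩ := hhit
        rw [hholet] at hkj; exact absurd hkj (by simp)
      · exact A3 i j hj' hhit
    · -- p < len(words[t])
      have hkeyexpr : PySem.Chars.slice words[t].toList none (some (p : Int)) ++
          PySem.Chars.slice words[t].toList (some ((p : Int) + 1)) none
            = pvHole words[t].toList p := pvSlicePair _ p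
      have hholet : pvHoleAt words p t = some (pvHole words[t].toList p) := by
        unfold pvHoleAt
        rw [if_pos (by rw [hwt]; omega), hwt]
      cases hdk : d.get? (pvHole words[t].toList p) with
      | none =>
        -- fresh hole: insert
        have hstep : pvStepB words p (d, b) (words[t], t)
            = (d.insert (pvHole words[t].toList p) t, b) := by
          simp only [pvStepB]
          rw [if_neg hlen]
          simp only [hkeyexpr]
          rw [hdk]
        rw [hstep]
        have hnoa : ∀ a, a < t → pvHoleAt words p a ≠ some (pvHole words[t].toList p) := by
          intro a ha hcontra
          obtain ⟨a0, ha0t, ha0h, ha0min⟩ := pvFirstEx words p t _ ⟨a, ha, hcontra⟩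
          have hcon := (hd _ a0).mpr ⟨ha0t, ha0h, ha0min⟩
          rw [hdk] at hcon
          simp at hcon
        have hd' : pvDictInv words p (t + 1) (d.insert (pvHole words[t].toList p) t) := by
          intro k i
          by_cases hk : k = pvHole words[t].toList p
          · subst hk
            rw [PySem.Dict.get?_insert_self]
            constructor
            · intro hsome
              injection hsome with hi
              subst hi
              exact ⟨by omega, hholet, hnoa⟩
            · rintro ⟨h1, h2, h3⟩
              rcases (by omega : i < t ∨ i = t) with h | rfl
              · exact absurd h2 (hnoa i h)
              · rfl
          · rw [PySem.Dict.get?_insert_of_ne _ _ hk]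
            constructor
            · intro hsome
              have h2 := (hd _ i).mp hsome
              exact ⟨by omega, h2.2.1, h2.2.2⟩
            · rintro ⟨h1, h2, h3⟩
              apply (hd _ i).mpr
              rcases (by omega : i < t ∨ i = t) with h | rfl
              · exact ⟨h, h2, h3⟩
              · exfalso
                apply hk
                rw [hholet] at h2
                injection h2 with hh
                exact hh.symm
        obtain ⟨A1, A2, A3⟩ := ih (t + 1) (by omega) (by omega) _ b hd' hb
        refine ⟨A1, A2, ?_⟩
        intro i j hj hhit
        rcases (by omega : j = t ∨ t + 1 ≤ j) with rfl | hj'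
        · exfalso
          obtain ⟨k, hkj, hki, hij, hmin, hw⟩ := hhit
          rw [hholet] at hkj
          injection hkj with hk
          exact hnoa i hij (hk ▸ hki)
        · exact A3 i j hj' hhit
      | some i0 =>
        have hq := (hd _ i0).mp hdk
        have hd' : pvDictInv words p (t + 1) d := by
          intro k i
          constructor
          · intro hsome
            have h2 := (hd k i).mp hsome
            exact ⟨by omega, h2.2.1, h2.2.2⟩
          · rintro ⟨h1, h2, h3⟩
            apply (hd k i).mpr
            rcases (by omega : i < t ∨ i = t) with h | rfl
            · exact ⟨h, h2, h3⟩
            · exfalso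
              rw [hholet] at h2
              injection h2 with hk
              exact h3 i0 hq.1 (hk ▸ hq.2.1)
        -- at j = t, any hit pair must use the stored first index i0
        have hfirst : ∀ i, pvHitCond words p i t → i = i0 := by
          rintro i ⟨k, hkj, hki, hij, hmin, hw⟩
          rw [hholet] at hkj
          injection hkj with hk
          subst hk
          have h1 : ¬ i < i0 := fun hlt => hq.2.2 i hlt hki
          have h2 : ¬ i0 < i := fun hlt => hmin i0 hlt hq.2.1
          omega
        by_cases hwne : words.getD i0 "" ≠ words[t]
        · -- record a candidate (i0, t)
          have hhi0 := pvHoleAt_some hq.2.1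
          have hnei0 : pvWordAt words i0 ≠ pvWordAt words t := by
            intro hcon
            apply hwne
            apply String.toList_inj.mp
            rw [← hget]
            exact hcon
          have hcand := pvHoleLemma (pvWordAt words i0) (pvWordAt words t) p hhi0.1
            (by rw [hwt]; omega) (by rw [hwt, hhi0.2]) hnei0
          have hC : pvCand words i0 t = true := by
            simp [pvCand, hcand.1, hcand.2.1]
          have hK : pvKey words i0 t = pvHole words[t].toList p := by
            unfold pvKey
            rw [hcand.2.2, hhi0.2]
          have hOC : pvOptCand words (some (i0, t, pvHole words[t].toList p)) := by
            rintro x hx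
            injection hx with hx
            subst hx
            exact ⟨hq.1, htn, hC, hK.symm⟩
          have hletr : pvLexLe (pvTr (i0, t, pvHole words[t].toList p)) (i0, t) :=
            pvLexLe_refl (i0, t)
          cases b with
          | none =>
            have hstep : pvStepB words p (d, none) (words[t], t)
                = (d, some (i0, t, pvHole words[t].toList p)) := by
              simp only [pvStepB]
              rw [if_neg hlen]
              simp only [hkeyexpr]
              rw [hdk]
              simp only [if_pos hwne]
            rw [hstep]
            obtain ⟨A1, A2, A3⟩ := ih (t + 1) (by omega) (by omega) d _ hd' hOC
            refine ⟨A1, pvBetter_none _, ?_⟩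
            intro i j hj hhit
            rcases (by omega : j = t ∨ t + 1 ≤ j) with rfl | hj'
            · have hii0 : i = i0 := hfirst i hhit
              rw [hii0]
              exact pvBetter_bound A2 ⟨(i0, j, pvHole words[j].toList p), rfl, hletr⟩
            · exact A3 i j hj' hhit
          | some bb =>
            by_cases hlt : i0 < bb.1 ∨ (i0 = bb.1 ∧ t < bb.2.1)
            · have hstep : pvStepB words p (d, some bb) (words[t], t)
                  = (d, some (i0, t, pvHole words[t].toList p)) := by
                simp only [pvStepB]
                rw [if_neg hlen]
                simp only [hkeyexpr]
                rw [hdk]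
                simp only [if_pos hwne]
                rw [if_pos hlt]
              rw [hstep]
              obtain ⟨A1, A2, A3⟩ := ih (t + 1) (by omega) (by omega) d _ hd' hOC
              have hbet : pvBetter (some (i0, t, pvHole words[t].toList p)) (some bb) := by
                rintro x hx
                injection hx with hx
                subst hx
                refine ⟨(i0, t, pvHole words[t].toList p), rfl, ?_⟩
                simp only [pvTr, pvLexLe]
                rcases hlt with h | ⟨h1, h2⟩
                · exact Or.inl h
                · exact Or.inr ⟨h1, by omega⟩
              refine ⟨A1, pvBetter_trans A2 hbet, ?_⟩
              intro i j hj hhit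
              rcases (by omega : j = t ∨ t + 1 ≤ j) with rfl | hj'
              · have hii0 : i = i0 := hfirst i hhit
                rw [hii0]
                exact pvBetter_bound A2 ⟨(i0, j, pvHole words[j].toList p), rfl, hletr⟩
              · exact A3 i j hj' hhit
            · have hstep : pvStepB words p (d, some bb) (words[t], t) = (d, some bb) := by
                simp only [pvStepB]
                rw [if_neg hlen]
                simp only [hkeyexpr]
                rw [hdk]
                simp only [if_pos hwne]
                rw [if_neg hlt]
              rw [hstep]
              obtain ⟨A1, A2, A3⟩ := ih (t + 1) (by omega) (by omega) d _ hd' hb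
              refine ⟨A1, A2, ?_⟩
              intro i j hj hhit
              rcases (by omega : j = t ∨ t + 1 ≤ j) with rfl | hj'
              · have hii0 : i = i0 := hfirst i hhit
                rw [hii0]
                refine pvBetter_bound A2 ⟨bb, rfl, ?_⟩
                simp only [pvTr, pvLexLe]
                push_neg at hlt
                omega
              · exact A3 i j hj' hhit
        · -- equal words: nothing recorded
          push_neg at hwne
          have hstep : pvStepB words p (d, b) (words[t], t) = (d, b) := by
            simp only [pvStepB]
            rw [if_neg hlen]
            simp only [hkeyexpr]
            rw [hdk]
            simp
            intro hcon
            exact absurd hwne hcon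
          rw [hstep]
          obtain ⟨A1, A2, A3⟩ := ih (t + 1) (by omega) (by omega) d b hd' hb
          refine ⟨A1, A2, ?_⟩
          intro i j hj hhit
          rcases (by omega : j = t ∨ t + 1 ≤ j) with rfl | hj'
          · exfalso
            have hii0 : i = i0 := hfirst i hhit
            obtain ⟨k, hkj, hki, hij, hmin, hw⟩ := hhit
            apply hw
            unfold pvWordAt
            rw [hii0, hwne, hget]
          · exact A3 i j hj' hhit

-- ---- outer fold (all positions) ----
lemma pvOuter (words : List String) :
    ∀ (ps : List Nat) (b : Option (Nat × Nat × List Char)), pvOptCand words b →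
    (pvOptCand words (ps.foldl
        (fun b p => ((words.zipIdx).foldl (pvStepB words p) (PySem.Dict.empty, b)).2) b) ∧
     pvBetter (ps.foldl
        (fun b p => ((words.zipIdx).foldl (pvStepB words p) (PySem.Dict.empty, b)).2) b) b ∧
     (∀ i j p, p ∈ ps → pvHitCond words p i j →
        pvBoundBy (ps.foldl
          (fun b p => ((words.zipIdx).foldl (pvStepB words p) (PySem.Dict.empty, b)).2) b) (i, j))) := by
  intro ps
  induction ps with
  | nil =>
    intro b hb
    refine ⟨hb, pvBetter_refl b, ?_⟩
    intro i j p hp _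
    exact absurd hp (List.not_mem_nil)
  | cons p ps ih =>
    intro b hb
    have hdict0 : pvDictInv words p 0 PySem.Dict.empty := by
      intro k i
      rw [PySem.Dict.get?_empty]
      constructor
      · intro h; exact absurd h (by simp)
      · rintro ⟨h1, _, _⟩; omega
    have hz := pvInner words p words.length 0 rfl (by omega) PySem.Dict.empty b hdict0 hb
    rw [List.drop_zero] at hz
    obtain ⟨B1, B2, B3⟩ := hz
    simp only [List.foldl_cons]
    obtain ⟨C1, C2, C3⟩ := ih ((words.zipIdx.foldl (pvStepB words p) (PySem.Dict.empty, b)).2) B1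
    refine ⟨C1, pvBetter_trans C2 B2, ?_⟩
    intro i j p' hp' hhit
    rcases List.mem_cons.mp hp' with rfl | hmem
    · exact pvBetter_bound C2 (B3 i j (by omega) hhit)
    · exact C3 i j p' hmem hhit

lemma pvMaxlen (words : List String) (i : Nat) (h : i < words.length) :
    (pvWordAt words i).length ≤ words.foldl (fun m w => max m w.toList.length) 0 := by
  have hrw : words.foldl (fun m w => max m w.toList.length) 0
      = (words.map (fun w => w.toList.length)).foldl max 0 := by
    rw [List.foldl_map]
  rw [hrw]
  refine (PySem.List.le_foldl_max _ 0).2 _ ?_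
  refine List.mem_map.mpr ⟨words.getD i "", ?_, rfl⟩
  rw [List.getD_eq_getElem words "" h]
  exact List.getElem_mem h

-- ---- final assembly ----
lemma pvMain (words : List String) : part2 words = part2_alt words := by
  have hA := pvPart2_eq words
  obtain ⟨B1, B2, B3⟩ := pvOuter words
      (List.range (words.foldl (fun m w => max m w.toList.length) 0)) none
      (fun x hx => nomatch hx)
  have hBalt : part2_alt words
      = (match (List.range (words.foldl (fun m w => max m w.toList.length) 0)).foldl
          (fun b p => ((words.zipIdx).foldl (pvStepB words p) (PySem.Dict.empty, b)).2) none with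
        | some y => some (String.ofList y.2.2)
        | none => none) := rfl
  cases hhead : ((pvPairs words.length 0).filter (fun q => pvCand words q.1 q.2)).head? with
  | none =>
    have hnil := List.head?_eq_none_iff.mp hhead
    have hbf : (List.range (words.foldl (fun m w => max m w.toList.length) 0)).foldl
        (fun b p => ((words.zipIdx).foldl (pvStepB words p) (PySem.Dict.empty, b)).2) none = none := by
      cases hbv : (List.range (words.foldl (fun m w => max m w.toList.length) 0)).foldl
          (fun b p => ((words.zipIdx).foldl (pvStepB words p) (PySem.Dict.empty, b)).2) none with
      | none => rfl
      | some y =>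
        exfalso
        obtain ⟨h1, h2, h3, h4⟩ := B1 y hbv
        have hmem : (y.1, y.2.1) ∈ (pvPairs words.length 0).filter (fun q => pvCand words q.1 q.2) :=
          List.mem_filter.mpr ⟨(pvPairs_mem _ _ _).mpr ⟨Nat.zero_le _, h1, h2⟩, h3⟩
        rw [hnil] at hmem
        exact absurd hmem (List.not_mem_nil)
    rw [hA, hhead, hBalt, hbf]
    rfl
  | some q0 =>
    have hq0mem : q0 ∈ (pvPairs words.length 0).filter (fun q => pvCand words q.1 q.2) :=
      List.mem_of_mem_head? (Option.mem_def.mpr hhead)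
    obtain ⟨hq0p, hq0c⟩ := List.mem_filter.mp hq0mem
    have hq0p' := (pvPairs_mem _ _ _).mp hq0p
    have hsorted : ((pvPairs words.length 0).filter (fun q => pvCand words q.1 q.2)).Pairwise pvLexLt :=
      List.Pairwise.filter _ (pvPairs_pairwise words.length 0)
    have hmin : ∀ q ∈ (pvPairs words.length 0).filter (fun q => pvCand words q.1 q.2),
        q0 = q ∨ pvLexLt q0 q := by
      intro q hq
      cases hcs : (pvPairs words.length 0).filter (fun q => pvCand words q.1 q.2) with
      | nil => rw [hcs] at hq; exact absurd hq (List.not_mem_nil)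
      | cons c tl =>
        rw [hcs] at hhead hq hsorted
        have hcq : c = q0 := by simpa using hhead
        rcases List.mem_cons.mp hq with rfl | htl
        · exact Or.inl hcq.symm
        · right
          have hpc := (List.pairwise_cons.mp hsorted).1 q htl
          rw [← hcq]
          exact hpc
    have hcand : (pvWordAt words q0.1).length = (pvWordAt words q0.2).length ∧
        pvCnt (pvWordAt words q0.1) (pvWordAt words q0.2) = 1 := by
      simpa [pvCand] using hq0c
    obtain ⟨hdl, hne, hheq⟩ := pvCandStruct _ _ hcand.1 hcand.2
    have hhi : pvHoleAt words (pvDpos (pvWordAt words q0.1) (pvWordAt words q0.2)) q0.1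
        = some (pvKey words q0.1 q0.2) := by
      unfold pvHoleAt
      rw [if_pos hdl]
      rfl
    have hhj : pvHoleAt words (pvDpos (pvWordAt words q0.1) (pvWordAt words q0.2)) q0.2
        = some (pvKey words q0.1 q0.2) := by
      unfold pvHoleAt
      rw [if_pos (by rw [← hcand.1]; exact hdl)]
      exact congrArg some hheq.symm
    have hminidx : ∀ a, a < q0.1 →
        pvHoleAt words (pvDpos (pvWordAt words q0.1) (pvWordAt words q0.2)) a
          ≠ some (pvKey words q0.1 q0.2) := by
      intro a ha hcontra
      obtain ⟨hpa, hha⟩ := pvHoleAt_some hcontra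
      by_cases hav : pvWordAt words a = pvWordAt words q0.2
      · have hnau : pvWordAt words a ≠ pvWordAt words q0.1 := by
          rw [hav]
          exact fun h => hne h.symm
        have hl2 := pvHoleLemma (pvWordAt words a) (pvWordAt words q0.1) _ hpa hdl hha hnau
        have hc2 : pvCand words a q0.1 = true := by simp [pvCand, hl2.1, hl2.2.1]
        have hmem2 : (a, q0.1) ∈ (pvPairs words.length 0).filter (fun q => pvCand words q.1 q.2) :=
          List.mem_filter.mpr ⟨(pvPairs_mem _ _ _).mpr ⟨Nat.zero_le _, ha, by omega⟩, hc2⟩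
        rcases hmin _ hmem2 with heq | hlt
        · have hqa : q0.1 = a := congrArg Prod.fst heq
          omega
        · simp only [pvLexLt] at hlt
          omega
      · have hl2 := pvHoleLemma (pvWordAt words a) (pvWordAt words q0.2) _ hpa
          (by rw [← hcand.1]; exact hdl) (hha.trans hheq) hav
        have hc2 : pvCand words a q0.2 = true := by simp [pvCand, hl2.1, hl2.2.1]
        have hmem2 : (a, q0.2) ∈ (pvPairs words.length 0).filter (fun q => pvCand words q.1 q.2) :=
          List.mem_filter.mpr ⟨(pvPairs_mem _ _ _).mpr ⟨Nat.zero_le _, by omega, by omega⟩, hc2⟩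
        rcases hmin _ hmem2 with heq | hlt
        · have hqa : q0.1 = a := congrArg Prod.fst heq
          omega
        · simp only [pvLexLt] at hlt
          omega
    have hhit : pvHitCond words (pvDpos (pvWordAt words q0.1) (pvWordAt words q0.2)) q0.1 q0.2 :=
      ⟨pvKey words q0.1 q0.2, hhj, hhi, hq0p'.2.1, hminidx, hne⟩
    have hpmem : pvDpos (pvWordAt words q0.1) (pvWordAt words q0.2)
        ∈ List.range (words.foldl (fun m w => max m w.toList.length) 0) := by
      refine List.mem_range.mpr (lt_of_lt_of_le hdl ?_)
      exact pvMaxlen words q0.1 (by omega)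
    obtain ⟨y, hy, hyle⟩ := B3 q0.1 q0.2 _ hpmem hhit
    obtain ⟨h1, h2, h3, h4⟩ := B1 y hy
    have hymem : (y.1, y.2.1) ∈ (pvPairs words.length 0).filter (fun q => pvCand words q.1 q.2) :=
      List.mem_filter.mpr ⟨(pvPairs_mem _ _ _).mpr ⟨Nat.zero_le _, h1, h2⟩, h3⟩
    have hyq : (y.1, y.2.1) = q0 := by
      rcases hmin _ hymem with heq | hlt
      · exact heq.symm
      · exfalso
        simp only [pvLexLt] at hlt
        simp only [pvLexLe, pvTr] at hyle
        omega
    have hy1 : y.1 = q0.1 := congrArg Prod.fst hyq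
    have hy2 : y.2.1 = q0.2 := congrArg Prod.snd hyq
    rw [hA, hhead, hBalt, hy]
    simp [h4, hy1, hy2]

-- ===== VERDICT (by name: the statement is the Claim_ definition above) =====
theorem part2_spec : Claim_equal_part2 := by
  intro words _ _
  unfold Spec_part2
  exact pvMain words
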